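-- pv_equiv track=rewrite | github.com/nicholasbarnette/AdventOfCode2021 | day8/part1/main.py | get_unique_values
-- ===== SOURCE A (Python) =====
-- def get_unique_values(lines):
--     unique_values = 0
--     for l in lines:
--         output_values = l.split(' | ')[1].split(' ')
--         for idx, v in enumerate(output_values):
--             output_values[idx] = v.strip()
--
--         for v in output_values:
--
--             if len(v) == 2:
--                 # Found a 1
--                 unique_values += 1
--             elif len(v) == 3:
--                 # Found a 7
--                 unique_values += 1
--             elif len(v) == 4:
--                 # Found a 4
--                 unique_values += 1
--             elif len(v) == 7:
--                 # Found a 8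
--                 unique_values += 1
--     return unique_values
-- ===== SOURCE B (Python) =====
-- def get_unique_values(lines):
--     # Character-level scan: instead of split(' ') + strip() + per-token branching,
--     # walk each output segment once with a tokenizer state machine. Tokens are
--     # delimited by single spaces; a token's stripped length is the span from its
--     # first to its last non-whitespace character (0 if none). Count spans of
--     # length 2, 3, 4 or 7.
--     total = 0
--     for l in lines:
--         seg = l.split(' | ')[1]
--         first = -1  # offset of first non-whitespace char in current token, -1 if none yet
--         last = -1   # offset of last non-whitespace char seen in current token
--         pos = 0     # offset within current token
--         for c in seg:
--             if c == ' ':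
--                 if first >= 0 and last - first + 1 in (2, 3, 4, 7):
--                     total += 1
--                 first = -1
--                 last = -1
--                 pos = 0
--             else:
--                 if not c.isspace():
--                     if first < 0:
--                         first = pos
--                     last = pos
--                 pos += 1
--         if first >= 0 and last - first + 1 in (2, 3, 4, 7):
--             total += 1
--     return total
-- ===== Notes on version B (the rewrite author's own statement) =====
-- stated objective: alternative
-- what changed: Replaces split(' ')/strip()/if-elif token classification with a single character-level tokenizer state machine over each output segment: it tracks the offsets of the first and last non-whitespace character of the current token and counts tokens whose span is 2, 3, 4 or 7, never materialising the token list or the stripped strings.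
import Mathlib
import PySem

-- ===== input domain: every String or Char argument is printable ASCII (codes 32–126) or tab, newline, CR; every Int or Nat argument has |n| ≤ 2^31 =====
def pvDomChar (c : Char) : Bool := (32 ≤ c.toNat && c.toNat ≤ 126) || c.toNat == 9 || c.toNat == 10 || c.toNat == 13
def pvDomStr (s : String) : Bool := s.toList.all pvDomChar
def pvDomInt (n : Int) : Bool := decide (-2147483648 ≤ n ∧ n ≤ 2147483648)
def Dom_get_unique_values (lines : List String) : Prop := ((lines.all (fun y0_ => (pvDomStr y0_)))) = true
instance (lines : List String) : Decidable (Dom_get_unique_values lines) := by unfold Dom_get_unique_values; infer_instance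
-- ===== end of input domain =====

-- B replaces A's split(' ')/strip()/if-elif classification with a single character-level
-- tokenizer state machine over each output segment (alternative decomposition, same cost).

-- ===== PORT A =====
-- l.split(' | ')[1].split(' '): the ' | ' separator is nonempty so split? is `some`;
-- the [1] index is in range under Pre_ (pyGetD's default is never used there).
def get_unique_values (lines : List String) : Int :=
  lines.foldl (fun unique_values l =>
    let output_values :=
      (PySem.Str.split? (PySem.List.pyGetD ((PySem.Str.split? l " | ").getD []) 1 "") " ").getD []
    -- 'for idx, v in enumerate(output_values): output_values[idx] = v.strip()' — an index-wise
    -- in-place rewrite of every element, ported as the element-wise map it performs.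
    let output_values := output_values.map PySem.Str.strip
    output_values.foldl (fun unique_values v =>
      if PySem.Str.len v = 2 then unique_values + 1
      else if PySem.Str.len v = 3 then unique_values + 1
      else if PySem.Str.len v = 4 then unique_values + 1
      else if PySem.Str.len v = 7 then unique_values + 1
      else unique_values) unique_values) 0

-- ===== PORT B =====
-- the repeated Python expression 'first >= 0 and last - first + 1 in (2, 3, 4, 7)' as 0/1
def pvFin (first last : Int) : Int :=
  if 0 ≤ first ∧ (last - first + 1 = 2 ∨ last - first + 1 = 3 ∨ last - first + 1 = 4 ∨ last - first + 1 = 7)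
  then 1 else 0

-- the loop body for one character; state = (total, first, last, pos)
def pvStep (st : Int × Int × Int × Int) (c : Char) : Int × Int × Int × Int :=
  if c = ' ' then
    (st.1 + pvFin st.2.1 st.2.2.1, -1, -1, 0)
  else
    (st.1,
     if PySem.Chars.isspace c = false ∧ st.2.1 < 0 then st.2.2.2 else st.2.1,
     if PySem.Chars.isspace c = false then st.2.2.2 else st.2.2.1,
     st.2.2.2 + 1)

def get_unique_values_alt (lines : List String) : Int :=
  lines.foldl (fun total l =>
    let seg := PySem.List.pyGetD ((PySem.Str.split? l " | ").getD []) 1 ""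
    let st := seg.toList.foldl pvStep (total, -1, -1, 0)
    st.1 + pvFin st.2.1 st.2.2.1) 0

-- ===== PRECONDITION & SPEC =====
-- Pre_ excludes exactly the lines with no ' | ' separator, on which A's '[1]' raises IndexError.
def Pre_get_unique_values (lines : List String) : Prop :=
  ∀ l ∈ lines, PySem.Str.isIn " | " l = true
instance (lines : List String) : Decidable (Pre_get_unique_values lines) := by
  unfold Pre_get_unique_values; infer_instance
def pvWitness_get_unique_values : List String := ["ab cd | ab abc abcd abcdefg"]

def Spec_get_unique_values (lines : List String) (out : Int) : Prop := out = get_unique_values_alt lines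
instance (lines : List String) (out : Int) : Decidable (Spec_get_unique_values lines out) := by unfold Spec_get_unique_values; infer_instance

-- ===== CLAIM (what is proved, stated in full; the proofs are below) =====
def Claim_equal_get_unique_values : Prop := ∀ (lines : List String), Dom_get_unique_values lines → Pre_get_unique_values lines → Spec_get_unique_values lines (get_unique_values lines)

-- ===== LEMMAS AND PROOFS =====

-- apply f to the head of a list, keep the tail
def pvMapHead (f : List Char → List Char) : List (List Char) → List (List Char)
  | [] => []
  | t :: ts => f t :: ts

-- structural recursion computing split on a single space (what splitOn does for sep = [' '])
def pvSplit1 : List Char → List (List Char)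
  | [] => [[]]
  | c :: rest => if c = ' ' then [] :: pvSplit1 rest else pvMapHead (fun t => c :: t) (pvSplit1 rest)

theorem pvSplit1_ne_nil (cs : List Char) : pvSplit1 cs ≠ [] := by
  cases cs with
  | nil => simp [pvSplit1]
  | cons c rest =>
    simp only [pvSplit1]
    split
    · simp
    · cases h : pvSplit1 rest with
      | nil => exact absurd h (pvSplit1_ne_nil rest)
      | cons a as => simp [pvMapHead]

theorem pvGo_eq (fuel : Nat) (l cur : List Char) (acc : List (List Char))
    (h : l.length < fuel) :
    PySem.Chars.splitOn.go [' '] fuel l cur acc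
      = acc.reverse ++ pvMapHead (fun t => cur.reverse ++ t) (pvSplit1 l) := by
  induction fuel generalizing l cur acc with
  | zero => omega
  | succ f ih =>
    cases l with
    | nil =>
      rw [PySem.Chars.splitOn.go.eq_def]
      simp [pvSplit1, pvMapHead]
    | cons c rest =>
      have hgo : PySem.Chars.splitOn.go [' '] (f+1) (c :: rest) cur acc
          = (if ([' '] : List Char).isPrefixOf (c :: rest) = true
             then PySem.Chars.splitOn.go [' '] f (List.drop 1 (c :: rest)) [] (cur.reverse :: acc)
             else PySem.Chars.splitOn.go [' '] f rest (c :: cur) acc) := by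
        rw [PySem.Chars.splitOn.go.eq_def]
        rfl
      have hlen : rest.length < f := by simp at h; omega
      rw [hgo]
      by_cases hc : c = ' '
      · subst hc
        rw [if_pos (by simp [List.isPrefixOf])]
        rw [ih (List.drop 1 (' ' :: rest)) [] (cur.reverse :: acc) (by simpa using hlen)]
        cases hs : pvSplit1 rest with
        | nil => exact absurd hs (pvSplit1_ne_nil rest)
        | cons a as => simp [pvSplit1, pvMapHead, hs]
      · rw [if_neg (by simp [List.isPrefixOf]; exact fun hcc => hc hcc.symm)]
        rw [ih rest (c :: cur) acc hlen]
        cases hs : pvSplit1 rest with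
        | nil => exact absurd hs (pvSplit1_ne_nil rest)
        | cons a as => simp [pvSplit1, hc, pvMapHead, hs]

theorem pvSplitOn_space (cs : List Char) :
    PySem.Chars.splitOn cs [' '] = pvSplit1 cs := by
  rw [PySem.Chars.splitOn, pvGo_eq cs.length.succ cs [] [] (by omega)]
  cases hs : pvSplit1 cs with
  | nil => exact absurd hs (pvSplit1_ne_nil cs)
  | cons a as => simp [pvMapHead]

-- the length predicate on stripped tokens
def pvP (n : Int) : Bool := n == 2 || n == 3 || n == 4 || n == 7

def pvCnt1 (x : List Char) : Int := if pvP ((PySem.Chars.strip x).length : Int) then 1 else 0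
def pvCntL (ls : List (List Char)) : Int := (ls.map pvCnt1).sum

-- the pure (first, last, pos) machine on one token
def pvEncStep (st : Int × Int × Int) (c : Char) : Int × Int × Int :=
  (if PySem.Chars.isspace c = false ∧ st.1 < 0 then st.2.2 else st.1,
   if PySem.Chars.isspace c = false then st.2.2 else st.2.1,
   st.2.2 + 1)

def pvEncT (t : List Char) : Int × Int × Int := t.foldl pvEncStep (-1, -1, 0)

theorem pvEncT_append (t : List Char) (c : Char) :
    pvEncT (t ++ [c]) = pvEncStep (pvEncT t) c := by
  simp [pvEncT, List.foldl_append]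

-- characterization of the machine state after a whole token
theorem pvEncT_char (t : List Char) :
    pvEncT t =
      if t.dropWhile PySem.Chars.isspace = [] then (-1, -1, (t.length : Int))
      else (((t.takeWhile PySem.Chars.isspace).length : Int),
            (t.length : Int) - 1 - ((t.reverse.takeWhile PySem.Chars.isspace).length : Int),
            (t.length : Int)) := by
  induction t using List.reverseRecOn with
  | nil => simp [pvEncT]
  | append_singleton u c ihu =>
    rw [pvEncT_append, ihu]
    have htk : (u.takeWhile PySem.Chars.isspace).length ≤ u.length :=
      (List.takeWhile_prefix _).length_le
    have htkr : (u.reverse.takeWhile PySem.Chars.isspace).length ≤ u.length := by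
      have := (List.takeWhile_prefix (p := PySem.Chars.isspace) (l := u.reverse)).length_le
      simpa using this
    by_cases hu : u.dropWhile PySem.Chars.isspace = [] <;>
      by_cases hc : PySem.Chars.isspace c = true
    · -- all ws, c ws
      have h1 : (u ++ [c]).dropWhile PySem.Chars.isspace = [] := by
        simp [List.dropWhile_append, hu, List.dropWhile, hc]
      simp [h1, hu, pvEncStep, hc]
    · -- all ws, c non-ws
      have hall : u.takeWhile PySem.Chars.isspace = u := by
        rw [List.takeWhile_eq_self_iff]
        intro x hx
        by_contra hxp
        have := List.dropWhile_eq_nil_iff.mp hu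
        simp_all
      have h1 : (u ++ [c]).dropWhile PySem.Chars.isspace = [c] := by
        simp [List.dropWhile_append, hu, List.dropWhile, hc]
      have h2 : (u ++ [c]).takeWhile PySem.Chars.isspace = u := by
        rw [List.takeWhile_append, if_pos (by rw [hall])]
        simp [hc]
      simp [h1, h2, hu, pvEncStep, hc]
    · -- has non-ws, c ws
      have h1 : (u ++ [c]).dropWhile PySem.Chars.isspace ≠ [] := by
        simp [List.dropWhile_append, hu]
      have hne : (u.takeWhile PySem.Chars.isspace).length ≠ u.length := by
        intro hlen
        have heq : u.takeWhile PySem.Chars.isspace = u :=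
          (List.takeWhile_prefix _).eq_of_length hlen
        exact hu (List.dropWhile_eq_nil_iff.mpr (List.takeWhile_eq_self_iff.mp heq))
      have h2 : (u ++ [c]).takeWhile PySem.Chars.isspace = u.takeWhile PySem.Chars.isspace := by
        rw [List.takeWhile_append, if_neg hne]
      simp [h1, h2, hu, pvEncStep, hc]
      omega
    · -- has non-ws, c non-ws
      have h1 : (u ++ [c]).dropWhile PySem.Chars.isspace ≠ [] := by
        simp [List.dropWhile_append, hu]
      have hne : (u.takeWhile PySem.Chars.isspace).length ≠ u.length := by
        intro hlen
        have heq : u.takeWhile PySem.Chars.isspace = u :=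
          (List.takeWhile_prefix _).eq_of_length hlen
        exact hu (List.dropWhile_eq_nil_iff.mpr (List.takeWhile_eq_self_iff.mp heq))
      have h2 : (u ++ [c]).takeWhile PySem.Chars.isspace = u.takeWhile PySem.Chars.isspace := by
        rw [List.takeWhile_append, if_neg hne]
      simp [h1, h2, hu, pvEncStep, hc]

-- stripped length via first/last non-whitespace offsets
theorem pvStrip_len (t : List Char) (h : t.dropWhile PySem.Chars.isspace ≠ []) :
    ((PySem.Chars.strip t).length : Int)
      = ((t.length : Int) - 1 - ((t.reverse.takeWhile PySem.Chars.isspace).length : Int))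
        - ((t.takeWhile PySem.Chars.isspace).length : Int) + 1 := by
  have hd : t.takeWhile PySem.Chars.isspace ++ t.dropWhile PySem.Chars.isspace = t :=
    List.takeWhile_append_dropWhile
  set d := t.dropWhile PySem.Chars.isspace with hdd
  have hdlen : d.length + (t.takeWhile PySem.Chars.isspace).length = t.length := by
    have := congrArg List.length hd; simpa [Nat.add_comm] using this
  have hhead : PySem.Chars.isspace (d.head h) = false := List.head_dropWhile_not _ h
  have hne : (d.reverse.takeWhile PySem.Chars.isspace).length ≠ d.reverse.length := by
    intro hlen
    have heq := (List.takeWhile_prefix (p := PySem.Chars.isspace)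
      (l := d.reverse)).eq_of_length hlen
    have hall := List.takeWhile_eq_self_iff.mp heq
    have : PySem.Chars.isspace (d.head h) = true :=
      hall _ (by simp [List.head_mem h])
    simp [hhead] at this
  have hrev : t.reverse.takeWhile PySem.Chars.isspace
      = d.reverse.takeWhile PySem.Chars.isspace := by
    conv_lhs => rw [← hd]
    rw [List.reverse_append, List.takeWhile_append, if_neg hne]
  have hstrip : (PySem.Chars.strip t).length
      = d.length - (d.reverse.takeWhile PySem.Chars.isspace).length := by
    simp only [PySem.Chars.strip, PySem.Chars.lstrip, PySem.Chars.rstrip, ← hdd]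
    have := congrArg List.length
      (List.takeWhile_append_dropWhile (p := PySem.Chars.isspace) (l := d.reverse))
    simp only [List.length_append, List.length_reverse] at this
    simp only [List.length_reverse]
    omega
  have htkr : (d.reverse.takeWhile PySem.Chars.isspace).length ≤ d.length := by
    simpa using (List.takeWhile_prefix (p := PySem.Chars.isspace) (l := d.reverse)).length_le
  have hdpos : 0 < d.length := List.length_pos_iff.mpr h
  rw [hstrip, hrev]
  omega

theorem pvStrip_allws (t : List Char) (h : t.dropWhile PySem.Chars.isspace = []) :
    PySem.Chars.strip t = [] := by
  simp [PySem.Chars.strip, PySem.Chars.lstrip, PySem.Chars.rstrip, h]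

theorem pvFin_eq (t : List Char) :
    pvFin (pvEncT t).1 (pvEncT t).2.1 = pvCnt1 t := by
  rw [pvEncT_char]
  by_cases h : t.dropWhile PySem.Chars.isspace = []
  · rw [if_pos h]
    simp [pvFin, pvCnt1, pvStrip_allws t h, pvP]
  · rw [if_neg h]
    have hs := pvStrip_len t h
    simp only [pvFin, pvCnt1, pvP]
    rw [hs.symm]
    simp [or_assoc]

-- the scan over a segment counts tokens of split1 with stripped length 2/3/4/7
theorem pvScan (cs : List Char) (t : List Char) (total : Int) (ht : ' ' ∉ t) :
    (cs.foldl pvStep (total, pvEncT t)).1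
      + pvFin (cs.foldl pvStep (total, pvEncT t)).2.1 (cs.foldl pvStep (total, pvEncT t)).2.2.1
    = total + pvCntL (pvMapHead (fun x => t ++ x) (pvSplit1 cs)) := by
  induction cs generalizing t total with
  | nil =>
    simp only [List.foldl_nil, pvSplit1, pvMapHead, pvCntL, List.map, List.sum_cons,
      List.sum_nil, List.append_nil, add_zero]
    rw [pvFin_eq t]
  | cons c rest ih =>
    simp only [List.foldl_cons]
    by_cases hc : c = ' '
    · subst hc
      have hstep : pvStep (total, pvEncT t) ' '
          = (total + pvCnt1 t, pvEncT []) := by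
        show (total + pvFin (total, pvEncT t).2.1 (total, pvEncT t).2.2.1, -1, -1, 0)
          = (total + pvCnt1 t, pvEncT [])
        rw [show (total, pvEncT t).2.1 = (pvEncT t).1 from rfl,
            show (total, pvEncT t).2.2.1 = (pvEncT t).2.1 from rfl, pvFin_eq t]
        rfl
      rw [hstep, ih [] (total + pvCnt1 t) (by simp)]
      cases hs : pvSplit1 rest with
      | nil => exact absurd hs (pvSplit1_ne_nil rest)
      | cons a as =>
        simp [pvSplit1, pvMapHead, hs, pvCntL]
        ring
    · have hstep : pvStep (total, pvEncT t) c = (total, pvEncT (t ++ [c])) := by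
        rw [pvEncT_append]
        simp [pvStep, hc, pvEncStep]
      rw [hstep, ih (t ++ [c]) total (by simp [ht]; exact fun hcc => hc hcc.symm)]
      cases hs : pvSplit1 rest with
      | nil => exact absurd hs (pvSplit1_ne_nil rest)
      | cons a as => simp [pvSplit1, pvMapHead, hs, hc, pvCntL]

-- B's per-line computation
theorem pvB_line (seg : String) (total : Int) :
    (seg.toList.foldl pvStep (total, -1, -1, 0)).1
      + pvFin (seg.toList.foldl pvStep (total, -1, -1, 0)).2.1
              (seg.toList.foldl pvStep (total, -1, -1, 0)).2.2.1
    = total + pvCntL (pvSplit1 seg.toList) := by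
  have h := pvScan seg.toList [] total (by simp)
  simp only [pvEncT, List.foldl_nil] at h
  rw [h]
  cases hs : pvSplit1 seg.toList with
  | nil => exact absurd hs (pvSplit1_ne_nil seg.toList)
  | cons a as => simp [pvMapHead]

-- A's per-line computation
theorem pvA_line (seg : String) (acc : Int) :
    (((PySem.Str.split? seg " ").getD []).map PySem.Str.strip).foldl
      (fun unique_values v =>
        if PySem.Str.len v = 2 then unique_values + 1
        else if PySem.Str.len v = 3 then unique_values + 1
        else if PySem.Str.len v = 4 then unique_values + 1
        else if PySem.Str.len v = 7 then unique_values + 1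
        else unique_values) acc
    = acc + pvCntL (pvSplit1 seg.toList) := by
  obtain ⟨parts, hp, hmap⟩ : ∃ parts, PySem.Str.split? seg " " = some parts ∧
      parts.map String.toList = pvSplit1 seg.toList := by
    have h := PySem.Str.split?_map seg " "
    have hss : PySem.Chars.split? seg.toList " ".toList = some (pvSplit1 seg.toList) := by
      rw [show (" ".toList) = [' '] from rfl]
      simp [PySem.Chars.split?, pvSplitOn_space]
    rw [hss] at h
    cases hq : PySem.Str.split? seg " " with
    | none => rw [hq] at h; simp at h
    | some parts => rw [hq] at h; simp at h; exact ⟨parts, rfl, h⟩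
  rw [hp]
  simp only [Option.getD_some]
  rw [List.foldl_map]
  have hfe : ∀ (a : Int) (v : String),
      (if PySem.Str.len (PySem.Str.strip v) = 2 then a + 1
       else if PySem.Str.len (PySem.Str.strip v) = 3 then a + 1
       else if PySem.Str.len (PySem.Str.strip v) = 4 then a + 1
       else if PySem.Str.len (PySem.Str.strip v) = 7 then a + 1
       else a) = a + pvCnt1 v.toList := by
    intro a v
    simp only [PySem.Str.len_eq, PySem.Str.toList_strip, pvCnt1, pvP]
    split_ifs <;> simp_all
  simp only [hfe]
  rw [PySem.List.foldl_add parts (fun v => pvCnt1 v.toList) acc]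
  have : parts.map (fun v => pvCnt1 v.toList) = (parts.map String.toList).map pvCnt1 := by
    simp [List.map_map, Function.comp_def]
  rw [this, hmap]
  rfl

-- ===== VERDICT (by name: the statement is the Claim_ definition above) =====
theorem get_unique_values_spec : Claim_equal_get_unique_values := by
  intro lines hD hP
  clear hD hP
  unfold Spec_get_unique_values get_unique_values get_unique_values_alt
  induction lines using List.reverseRecOn with
  | nil => rfl
  | append_singleton u l ih =>
    simp only [List.foldl_append, List.foldl_cons, List.foldl_nil]
    rw [ih]
    rw [pvA_line, pvB_line]
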